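-- pv_equiv track=rewrite | github.com/alizarhassanali/Compiler-Design | lexical.py | classIdentifier
-- ===== SOURCE A (Python) =====
-- FloatOperators= {'+': 'Op_add' ,'-': 'Op_subtract' ,'*': 'Op_multiply' ,'/':'Op_divide' ,'//':'Op_floor' ,'%': 'Op_mod','++':'Op_incr' ,'--':'Op_decr', '^':'Op_exponent'}
--
-- StringOperators = {'add': 'Op_string_add', 'repeat': 'Op_string_multiply'}
--
-- RelationalOperators = {'==':'Op_equal', '~=': 'Op_notequal', '<': 'Op_less', '<=' : 'Op_lessequal', '>': 'Op_greater', '>=':'Op_greaterequal'}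
--
-- LogicalOperators = {'and': 'Op_and', 'or':'Op_or', 'not':'Op_not'}
--
-- ListOperators = {'join': 'Op_append', ':': 'Op_slice', '[' :'left_list_bracket', ']':'right_list_bracket'}
--
-- datatype = {'float' : 'float','int' : 'integer' ,'string': 'string','list': 'list', 'boolean': 'boolean'}
--
-- keyword = {'make' : 'keyword_make','return' : 'keyword_return','else':'keyword_else', 'print' : 'keyword_print', 'true' : 'keyword_true', 'false' : 'keyword_false', 'until' : 'keyword_until', 'if' : 'keyword_if', 'elseif' : 'keyword_elseif', 'put' : 'keyword_put', 'into' : 'keyword_into', 'for': 'keyword_for', 'in': 'keyword_in'}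
--
-- delimiter = {';':'endline'}
--
-- punctuation = {'{' : 'left_brace', '}':'right_list_bracket', '(':'open_parenthesis', ')':'close_parenthesis', ',': 'comma'}
--
-- def classIdentifier(DictTokens,a):
--   classDict = {}
--   Int = False
--
--   for i in DictTokens:
--     temp = []
--     for j in DictTokens[i]:
--       if j in FloatOperators.keys():
--         temp.append((j,FloatOperators[j]))
--       elif j in StringOperators.keys():
--         temp.append((j,StringOperators[j]))
--       elif j in LogicalOperators.keys():
--         temp.append ((j,LogicalOperators[j]))
--       elif j in RelationalOperators.keys():
--         temp.append((j,RelationalOperators[j]))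
--       elif j in ListOperators.keys():
--         temp.append((j,ListOperators[j]))
--       elif j in datatype.keys():
--         temp.append((j,datatype [j]))
--       elif j in keyword:
--         temp.append((j,'keyword'))
--       elif j in delimiter.keys():
--         temp.append((j,delimiter[j]))
--       elif j in punctuation.keys():
--         temp.append((j,punctuation[j]))
--
--       elif j in [k for k,v in a.values()]:
--         xyz = (([key for key, (value,idd) in a.items() if value == j]), 'identifier')
--         xyz = (xyz[0][0], xyz[1])
--         temp.append(xyz)
--       else:
--         temp.append((j,'unidentified'))
--     classDict[i] = temp
--   return (classDict )
-- ===== SOURCE B (Python) =====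
-- FloatOperators= {'+': 'Op_add' ,'-': 'Op_subtract' ,'*': 'Op_multiply' ,'/':'Op_divide' ,'//':'Op_floor' ,'%': 'Op_mod','++':'Op_incr' ,'--':'Op_decr', '^':'Op_exponent'}
-- StringOperators = {'add': 'Op_string_add', 'repeat': 'Op_string_multiply'}
-- RelationalOperators = {'==':'Op_equal', '~=': 'Op_notequal', '<': 'Op_less', '<=' : 'Op_lessequal', '>': 'Op_greater', '>=':'Op_greaterequal'}
-- LogicalOperators = {'and': 'Op_and', 'or':'Op_or', 'not':'Op_not'}
-- ListOperators = {'join': 'Op_append', ':': 'Op_slice', '[' :'left_list_bracket', ']':'right_list_bracket'}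
-- datatype = {'float' : 'float','int' : 'integer' ,'string': 'string','list': 'list', 'boolean': 'boolean'}
-- keyword = {'make' : 'keyword_make','return' : 'keyword_return','else':'keyword_else', 'print' : 'keyword_print', 'true' : 'keyword_true', 'false' : 'keyword_false', 'until' : 'keyword_until', 'if' : 'keyword_if', 'elseif' : 'keyword_elseif', 'put' : 'keyword_put', 'into' : 'keyword_into', 'for': 'keyword_for', 'in': 'keyword_in'}
-- delimiter = {';':'endline'}
-- punctuation = {'{' : 'left_brace', '}':'right_list_bracket', '(':'open_parenthesis', ')':'close_parenthesis', ',': 'comma'}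
--
-- def classIdentifier(DictTokens, a):
--     # Table-major staged refinement instead of A's per-token nine-branch cascade:
--     # start every token unclassified, then sweep the tables (in A's priority
--     # order) over the whole row, each sweep filling only still-unclassified
--     # slots; then a sweep per entry of `a` for identifiers; finally default.
--     tables = [FloatOperators, StringOperators, LogicalOperators, RelationalOperators,
--               ListOperators, datatype, {k: 'keyword' for k in keyword},
--               delimiter, punctuation]
--     result = {}
--     for i, toks in DictTokens.items():
--         cls = [None] * len(toks)
--         for table in tables:
--             cls = [c if c is not None else ((j, table[j]) if j in table else None)
--                    for c, j in zip(cls, toks)]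
--         for key, (value, idd) in a.items():
--             cls = [c if c is not None else ((key, 'identifier') if j == value else None)
--                    for c, j in zip(cls, toks)]
--         result[i] = [c if c is not None else (j, 'unidentified')
--                      for c, j in zip(cls, toks)]
--     return result
-- ===== Notes on version B (the rewrite author's own statement) =====
-- stated objective: alternative
-- what changed: Replaces A's token-major nine-branch membership cascade (with per-token rebuilds and scans of a) by table-major staged refinement: every token starts unclassified and one whole-row sweep per class table (then one per entry of a, then a default sweep) fills only the still-unclassified slots.
import Mathlib
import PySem

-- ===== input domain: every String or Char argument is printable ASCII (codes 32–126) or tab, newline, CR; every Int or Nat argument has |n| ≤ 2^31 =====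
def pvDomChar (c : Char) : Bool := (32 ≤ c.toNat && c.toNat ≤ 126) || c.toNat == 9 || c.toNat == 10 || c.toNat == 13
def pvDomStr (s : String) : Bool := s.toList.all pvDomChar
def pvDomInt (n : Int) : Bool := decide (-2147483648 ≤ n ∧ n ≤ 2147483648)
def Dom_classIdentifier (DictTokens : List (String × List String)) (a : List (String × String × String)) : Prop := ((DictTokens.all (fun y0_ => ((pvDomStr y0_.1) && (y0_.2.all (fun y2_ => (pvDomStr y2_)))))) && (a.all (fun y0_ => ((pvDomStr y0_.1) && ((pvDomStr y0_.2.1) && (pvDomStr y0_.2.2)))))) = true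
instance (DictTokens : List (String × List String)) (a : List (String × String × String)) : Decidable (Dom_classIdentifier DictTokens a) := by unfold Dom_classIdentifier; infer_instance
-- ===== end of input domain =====

-- ===== PORT A =====
-- B changes: table-major staged refinement (one sweep per class table over the whole row,
-- filling only still-unclassified slots) instead of A's token-major nine-branch cascade
-- with per-token scans of `a` (objective: alternative).
-- (the module-level literal dicts, shared context of both implementations)
def pvFO : List (String × String) := [("+","Op_add"),("-","Op_subtract"),("*","Op_multiply"),("/","Op_divide"),("//","Op_floor"),("%","Op_mod"),("++","Op_incr"),("--","Op_decr"),("^","Op_exponent")]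
def pvSO : List (String × String) := [("add","Op_string_add"),("repeat","Op_string_multiply")]
def pvRO : List (String × String) := [("==","Op_equal"),("~=","Op_notequal"),("<","Op_less"),("<=","Op_lessequal"),(">","Op_greater"),(">=","Op_greaterequal")]
def pvLO : List (String × String) := [("and","Op_and"),("or","Op_or"),("not","Op_not")]
def pvLst : List (String × String) := [("join","Op_append"),(":","Op_slice"),("[","left_list_bracket"),("]","right_list_bracket")]
def pvDT : List (String × String) := [("float","float"),("int","integer"),("string","string"),("list","list"),("boolean","boolean")]
def pvKW : List (String × String) := [("make","keyword_make"),("return","keyword_return"),("else","keyword_else"),("print","keyword_print"),("true","keyword_true"),("false","keyword_false"),("until","keyword_until"),("if","keyword_if"),("elseif","keyword_elseif"),("put","keyword_put"),("into","keyword_into"),("for","keyword_for"),("in","keyword_in")]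
def pvDel : List (String × String) := [(";","endline")]
def pvPunc : List (String × String) := [("{","left_brace"),("}","right_list_bracket"),("(","open_parenthesis"),(")","close_parenthesis"),(",","comma")]

def classIdentifier (DictTokens : List (String × List String)) (a : List (String × String × String)) : List (String × List (String × String)) :=
  let dt := PySem.Dict.ofList DictTokens
  let ad := PySem.Dict.ofList a
  let FO := PySem.Dict.mk pvFO
  let SO := PySem.Dict.mk pvSO
  let RO := PySem.Dict.mk pvRO
  let LO := PySem.Dict.mk pvLO
  let Lst := PySem.Dict.mk pvLst
  let DT := PySem.Dict.mk pvDT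
  let KW := PySem.Dict.mk pvKW
  let Del := PySem.Dict.mk pvDel
  let Punc := PySem.Dict.mk pvPunc
  (dt.keys.foldl (fun classDict i =>
    let temp := (dt.getD i []).foldl (fun temp j =>
      if FO.contains j then temp ++ [(j, FO.getD j "")]
      else if SO.contains j then temp ++ [(j, SO.getD j "")]
      else if LO.contains j then temp ++ [(j, LO.getD j "")]
      else if RO.contains j then temp ++ [(j, RO.getD j "")]
      else if Lst.contains j then temp ++ [(j, Lst.getD j "")]
      else if DT.contains j then temp ++ [(j, DT.getD j "")]
      else if KW.contains j then temp ++ [(j, "keyword")]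
      else if Del.contains j then temp ++ [(j, Del.getD j "")]
      else if Punc.contains j then temp ++ [(j, Punc.getD j "")]
      else if (ad.values.map (fun v => v.1)).contains j then
        temp ++ [(((ad.items.filter (fun q => q.2.1 == j)).map (fun q => q.1)).headD "", "identifier")]
      else temp ++ [(j, "unidentified")]) []
    classDict.insert i temp)
    (PySem.Dict.empty : PySem.Dict String (List (String × String)))).items

-- ===== PORT B =====
def classIdentifier_alt (DictTokens : List (String × List String)) (a : List (String × String × String)) : List (String × List (String × String)) :=
  let dt := PySem.Dict.ofList DictTokens
  let ad := PySem.Dict.ofList a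
  let tables : List (List (String × String)) :=
    [pvFO, pvSO, pvLO, pvRO, pvLst, pvDT, pvKW.map (fun p => (p.1, "keyword")), pvDel, pvPunc]
  (dt.items.foldl (fun result p =>
    let toks := p.2
    let cls0 : List (Option (String × String)) := toks.map (fun _ => none)
    let cls1 := tables.foldl (fun cls table =>
      (cls.zip toks).map (fun q =>
        q.1.or (match (PySem.Dict.mk table).get? q.2 with
                | some v => some (q.2, v)
                | none => none))) cls0
    let cls2 := ad.items.foldl (fun cls e =>
      (cls.zip toks).map (fun q =>
        q.1.or (if q.2 == e.2.1 then some (e.1, "identifier") else none))) cls1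
    result.insert p.1 ((cls2.zip toks).map (fun q => q.1.getD (q.2, "unidentified"))))
    (PySem.Dict.empty : PySem.Dict String (List (String × String)))).items

-- ===== PRECONDITION & SPEC =====
def Spec_classIdentifier (DictTokens : List (String × List String)) (a : List (String × String × String)) (out : List (String × List (String × String))) : Prop := out = classIdentifier_alt DictTokens a
instance (DictTokens : List (String × List String)) (a : List (String × String × String)) (out : List (String × List (String × String))) : Decidable (Spec_classIdentifier DictTokens a out) := by unfold Spec_classIdentifier; infer_instance

-- ===== CLAIM (what is proved, stated in full; the proofs are below) =====
def Claim_equal_classIdentifier : Prop := ∀ (DictTokens : List (String × List String)) (a : List (String × String × String)), Dom_classIdentifier DictTokens a → Spec_classIdentifier DictTokens a (classIdentifier DictTokens a)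

-- ===== LEMMAS AND PROOFS =====

-- get? on a literal dict is the first matching entry of its item list.
theorem pv_get?_mk_eq_find? {nu : Type} (l : List (String × nu)) (j : String) :
    (PySem.Dict.mk l).get? j = (l.find? (fun p => p.1 == j)).map (fun p => p.2) := by
  induction l with
  | nil => simp [PySem.Dict.get?]
  | cons p rest ih =>
    obtain ⟨k, v⟩ := p
    rw [PySem.Dict.get?_mk_cons]
    by_cases h : k = j
    · subst h; simp [List.find?]
    · have hb : (k == j) = false := by simp [h]
      simp [List.find?, hb, ih]

-- proof-only helper: the element each A-branch appends
def pvClassA (ad : PySem.Dict String (String × String)) (j : String) : String × String :=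
  if (PySem.Dict.mk pvFO).contains j then (j, (PySem.Dict.mk pvFO).getD j "")
  else if (PySem.Dict.mk pvSO).contains j then (j, (PySem.Dict.mk pvSO).getD j "")
  else if (PySem.Dict.mk pvLO).contains j then (j, (PySem.Dict.mk pvLO).getD j "")
  else if (PySem.Dict.mk pvRO).contains j then (j, (PySem.Dict.mk pvRO).getD j "")
  else if (PySem.Dict.mk pvLst).contains j then (j, (PySem.Dict.mk pvLst).getD j "")
  else if (PySem.Dict.mk pvDT).contains j then (j, (PySem.Dict.mk pvDT).getD j "")
  else if (PySem.Dict.mk pvKW).contains j then (j, "keyword")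
  else if (PySem.Dict.mk pvDel).contains j then (j, (PySem.Dict.mk pvDel).getD j "")
  else if (PySem.Dict.mk pvPunc).contains j then (j, (PySem.Dict.mk pvPunc).getD j "")
  else if (ad.values.map (fun v => v.1)).contains j then
    (((ad.items.filter (fun q => q.2.1 == j)).map (fun q => q.1)).headD "", "identifier")
  else (j, "unidentified")

theorem pv_body (ad : PySem.Dict String (String × String)) (acc : List (String × String)) (j : String) :
    (if (PySem.Dict.mk pvFO).contains j then acc ++ [(j, (PySem.Dict.mk pvFO).getD j "")]
      else if (PySem.Dict.mk pvSO).contains j then acc ++ [(j, (PySem.Dict.mk pvSO).getD j "")]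
      else if (PySem.Dict.mk pvLO).contains j then acc ++ [(j, (PySem.Dict.mk pvLO).getD j "")]
      else if (PySem.Dict.mk pvRO).contains j then acc ++ [(j, (PySem.Dict.mk pvRO).getD j "")]
      else if (PySem.Dict.mk pvLst).contains j then acc ++ [(j, (PySem.Dict.mk pvLst).getD j "")]
      else if (PySem.Dict.mk pvDT).contains j then acc ++ [(j, (PySem.Dict.mk pvDT).getD j "")]
      else if (PySem.Dict.mk pvKW).contains j then acc ++ [(j, "keyword")]
      else if (PySem.Dict.mk pvDel).contains j then acc ++ [(j, (PySem.Dict.mk pvDel).getD j "")]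
      else if (PySem.Dict.mk pvPunc).contains j then acc ++ [(j, (PySem.Dict.mk pvPunc).getD j "")]
      else if (ad.values.map (fun v => v.1)).contains j then
        acc ++ [(((ad.items.filter (fun q => q.2.1 == j)).map (fun q => q.1)).headD "", "identifier")]
      else acc ++ [(j, "unidentified")])
    = acc ++ [pvClassA ad j] := by
  unfold pvClassA
  by_cases h1 : ((PySem.Dict.mk pvFO).contains j) = true
  · simp only [if_pos h1]
  simp only [if_neg h1]
  by_cases h2 : ((PySem.Dict.mk pvSO).contains j) = true
  · simp only [if_pos h2]
  simp only [if_neg h2]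
  by_cases h3 : ((PySem.Dict.mk pvLO).contains j) = true
  · simp only [if_pos h3]
  simp only [if_neg h3]
  by_cases h4 : ((PySem.Dict.mk pvRO).contains j) = true
  · simp only [if_pos h4]
  simp only [if_neg h4]
  by_cases h5 : ((PySem.Dict.mk pvLst).contains j) = true
  · simp only [if_pos h5]
  simp only [if_neg h5]
  by_cases h6 : ((PySem.Dict.mk pvDT).contains j) = true
  · simp only [if_pos h6]
  simp only [if_neg h6]
  by_cases h7 : ((PySem.Dict.mk pvKW).contains j) = true
  · simp only [if_pos h7]
  simp only [if_neg h7]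
  by_cases h8 : ((PySem.Dict.mk pvDel).contains j) = true
  · simp only [if_pos h8]
  simp only [if_neg h8]
  by_cases h9 : ((PySem.Dict.mk pvPunc).contains j) = true
  · simp only [if_pos h9]
  simp only [if_neg h9]
  by_cases h10 : ((ad.values.map (fun v => v.1)).contains j) = true
  · simp only [if_pos h10]
  simp only [if_neg h10]

theorem pv_foldl_push {alpha beta : Type} (F : List beta → alpha → List beta) (f : alpha → beta)
    (hF : ∀ acc x, F acc x = acc ++ [f x]) (l : List alpha) (acc : List beta) :
    l.foldl F acc = acc ++ l.map f := by
  induction l generalizing acc with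
  | nil => simp
  | cons x xs ih => rw [List.foldl_cons, hF, ih, List.map_cons, List.append_assoc, List.singleton_append]

-- the outer dict-building loop of A appends one row per (distinct) key
theorem pv_items_foldl_insert_keys {nu : Type} (ks : List String) (f : String → nu)
    (h : ks.Nodup) :
    (ks.foldl (fun cd i => cd.insert i (f i)) PySem.Dict.empty).items
      = ks.map (fun i => (i, f i)) := by
  have := PySem.Dict.items_foldl_insert_fresh ks (fun i => i) f PySem.Dict.empty
    (by intro x _; rfl) (by simpa using h)
  simpa using this

-- the outer dict-building loop of B appends one row per (distinct) item
theorem pv_items_foldl_insert_items {nu1 nu2 : Type} (l : List (String × nu1)) (f : String × nu1 → nu2)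
    (h : (l.map Prod.fst).Nodup) :
    (l.foldl (fun cd p => cd.insert p.1 (f p)) PySem.Dict.empty).items
      = l.map (fun p => (p.1, f p)) := by
  have := PySem.Dict.items_foldl_insert_fresh l (fun p => p.1) f PySem.Dict.empty
    (by intro x _; rfl) h
  simpa using this

-- B-side: mapping over a zip of a mapped list is a single map
theorem pv_zip_map_map {alpha beta gamma : Type} (f : alpha → beta) (g : beta → alpha → gamma)
    (l : List alpha) :
    ((l.map f).zip l).map (fun q => g q.1 q.2) = l.map (fun x => g (f x) x) := by
  induction l with
  | nil => rfl
  | cons x xs ih => simp [ih]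

-- B-side: staged sweeps over a row commute into a per-token fold
theorem pv_passes {alpha beta gamma : Type} (toks : List alpha) (tabs : List gamma)
    (h : beta → gamma → alpha → beta) (f : alpha → beta) :
    tabs.foldl (fun cls t => ((cls.zip toks).map (fun q => h q.1 t q.2))) (toks.map f)
      = toks.map (fun j => tabs.foldl (fun c t => h c t j) (f j)) := by
  induction tabs generalizing f with
  | nil => simp
  | cons t ts ih =>
    rw [List.foldl_cons, pv_zip_map_map (fun x => f x) (fun c j => h c t j) toks, ih]
    simp [List.foldl_cons]

-- an Option.or-fold is the first `some` of the mapped list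
theorem pv_foldl_or {alpha beta : Type} (g : alpha → Option beta) (l : List alpha) (acc : Option beta) :
    l.foldl (fun c t => c.or (g t)) acc = acc.or (l.findSome? g) := by
  induction l generalizing acc with
  | nil => simp
  | cons t ts ih =>
    rw [List.foldl_cons, ih, Option.or_assoc]
    cases h : g t <;> simp [List.findSome?_cons, h, Option.or]

-- first `some` of a guarded function is the first matching element
theorem pv_findSome?_guard {alpha beta : Type} (p : alpha → Bool) (f : alpha → beta) (l : List alpha) :
    l.findSome? (fun e => if p e then some (f e) else none)
      = (l.find? p).map f := by
  induction l with
  | nil => rfl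
  | cons x xs ih =>
    by_cases h : p x = true
    · simp [List.findSome?_cons, List.find?, h]
    · simp only [Bool.not_eq_true] at h
      simp [List.findSome?_cons, List.find?, h, ih]

-- proof-only helper: B's per-token value
def pvClassB (ad : PySem.Dict String (String × String)) (j : String) : String × String :=
  ((([pvFO, pvSO, pvLO, pvRO, pvLst, pvDT, pvKW.map (fun p => (p.1, "keyword")), pvDel, pvPunc].findSome?
      (fun t => match (PySem.Dict.mk t).get? j with
                | some v => some (j, v)
                | none => none)).or
    (ad.items.findSome? (fun e => if j == e.2.1 then some (e.1, "identifier") else none))).getD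
    (j, "unidentified"))

-- the per-token classifiers agree
theorem pv_token (ad : PySem.Dict String (String × String)) (j : String) :
    pvClassA ad j = pvClassB ad j := by
  unfold pvClassA pvClassB
  rw [pv_findSome?_guard (fun e => j == e.2.1) (fun e => (e.1, "identifier")) ad.items]
  have hsym : ad.items.find? (fun e => j == e.2.1) = ad.items.find? (fun e => e.2.1 == j) := by
    have : (fun e : String × String × String => j == e.2.1) = (fun e => e.2.1 == j) :=
      funext fun e => Bool.beq_comm
    rw [this]
  rw [hsym]
  simp only [List.findSome?_cons, pv_get?_mk_eq_find?, PySem.Dict.contains_eq_isSome_get?,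
    PySem.Dict.getD_eq_get?_getD, List.find?_map]
  cases h1 : pvFO.find? (fun p => p.1 == j) with
  | some p => simp
  | none =>
  simp only [h1, Option.map_none, Option.isSome_none, Bool.false_eq_true, if_false]
  cases h2 : pvSO.find? (fun p => p.1 == j) with
  | some p => simp
  | none =>
  simp only [h2, Option.map_none, Option.isSome_none, Bool.false_eq_true, if_false]
  cases h3 : pvLO.find? (fun p => p.1 == j) with
  | some p => simp
  | none =>
  simp only [h3, Option.map_none, Option.isSome_none, Bool.false_eq_true, if_false]
  cases h4 : pvRO.find? (fun p => p.1 == j) with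
  | some p => simp
  | none =>
  simp only [h4, Option.map_none, Option.isSome_none, Bool.false_eq_true, if_false]
  cases h5 : pvLst.find? (fun p => p.1 == j) with
  | some p => simp
  | none =>
  simp only [h5, Option.map_none, Option.isSome_none, Bool.false_eq_true, if_false]
  cases h6 : pvDT.find? (fun p => p.1 == j) with
  | some p => simp
  | none =>
  simp only [h6, Option.map_none, Option.isSome_none, Bool.false_eq_true, if_false]
  cases h7 : pvKW.find? ((fun p => p.1 == j) ∘ (fun p => (p.1, "keyword"))) with
  | some p =>
    have h7' : pvKW.find? (fun p => p.1 == j) = some p := by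
      simpa [Function.comp] using h7
    simp [h7, h7']
  | none =>
  have h7' : pvKW.find? (fun p => p.1 == j) = none := by
    simpa [Function.comp] using h7
  simp only [h7, h7', Option.map_none, Option.isSome_none, Bool.false_eq_true, if_false]
  cases h8 : pvDel.find? (fun p => p.1 == j) with
  | some p => simp
  | none =>
  simp only [h8, Option.map_none, Option.isSome_none, Bool.false_eq_true, if_false]
  cases h9 : pvPunc.find? (fun p => p.1 == j) with
  | some p => simp
  | none =>
  simp only [h9, Option.map_none, Option.isSome_none, Bool.false_eq_true, if_false]
  cases hf : ad.items.find? (fun p => p.2.1 == j) with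
  | some p =>
    have hmem1 : p ∈ ad.items := List.mem_of_find?_eq_some hf
    have hmem2 : (p.2.1 == j) = true := by simpa using List.find?_some hf
    have hcontains : ((ad.values.map (fun v => v.1)).contains j) = true := by
      simp only [PySem.Dict.values, List.map_map, List.contains_eq_mem, decide_eq_true_iff, List.mem_map]
      exact ⟨p, hmem1, by simpa using hmem2⟩
    have hhead : ((ad.items.filter (fun q => q.2.1 == j)).map (fun q => q.1)).headD "" = p.1 := by
      rw [List.headD_eq_head?_getD, List.head?_map, List.head?_filter, hf]
      rfl
    simp only [hcontains, if_true, Option.map_some, Option.getD_some, List.findSome?_nil,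
      Option.none_or, hhead]
  | none =>
    have hcontains : ((ad.values.map (fun v => v.1)).contains j) = false := by
      simp only [PySem.Dict.values, List.map_map, List.contains_eq_mem, decide_eq_false_iff_not, List.mem_map]
      rintro ⟨p, hp, hpj⟩
      have h0 := List.find?_eq_none.mp hf p hp
      simp only [Function.comp] at hpj
      simp only [beq_iff_eq] at h0
      exact h0 hpj
    simp only [hcontains, Bool.false_eq_true, if_false, Option.map_none, Option.getD_none,
      List.findSome?_nil, Option.none_or]

-- B's whole row is the per-token map of pvClassB
theorem pv_row_B (ad : PySem.Dict String (String × String)) (toks : List String) :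
    ((ad.items.foldl
        (fun cls e => (cls.zip toks).map (fun q =>
          q.1.or (if q.2 == e.2.1 then some (e.1, "identifier") else none)))
        (([pvFO, pvSO, pvLO, pvRO, pvLst, pvDT, pvKW.map (fun p => (p.1, "keyword")), pvDel, pvPunc] : List (List (String × String))).foldl
          (fun cls table => (cls.zip toks).map (fun q =>
            q.1.or (match (PySem.Dict.mk table).get? q.2 with
                    | some v => some (q.2, v)
                    | none => none)))
          (toks.map (fun _ => none)))).zip toks).map (fun q => q.1.getD (q.2, "unidentified"))
      = toks.map (pvClassB ad) := by
  have e1 := pv_passes toks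
    ([pvFO, pvSO, pvLO, pvRO, pvLst, pvDT, pvKW.map (fun p => (p.1, "keyword")), pvDel, pvPunc])
    (fun c table j => c.or (match (PySem.Dict.mk table).get? j with
      | some v => some (j, v) | none => none))
    (fun _ => (none : Option (String × String)))
  rw [e1]
  rw [pv_passes toks ad.items
    (fun c e j => c.or (if j == e.2.1 then some (e.1, "identifier") else none))
    (fun j => List.foldl (fun c t => c.or (match (PySem.Dict.mk t).get? j with
      | some v => some (j, v) | none => none)) none
      [pvFO, pvSO, pvLO, pvRO, pvLst, pvDT, pvKW.map (fun p => (p.1, "keyword")), pvDel, pvPunc])]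
  rw [pv_zip_map_map
    (fun j => List.foldl (fun c t => c.or (if j == t.2.1 then some (t.1, "identifier") else none))
      (List.foldl (fun c t => c.or (match (PySem.Dict.mk t).get? j with
        | some v => some (j, v) | none => none)) none
        [pvFO, pvSO, pvLO, pvRO, pvLst, pvDT, pvKW.map (fun p => (p.1, "keyword")), pvDel, pvPunc])
      ad.items)
    (fun c j => c.getD (j, "unidentified")) toks]
  apply List.map_congr_left
  intro j _
  simp only [pv_foldl_or, Option.none_or, pvClassB]

-- ===== VERDICT (by name: the statement is the Claim_ definition above) =====
set_option maxRecDepth 8192 in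
theorem classIdentifier_spec : Claim_equal_classIdentifier := by
  intro DictTokens a _
  unfold Spec_classIdentifier
  simp only [classIdentifier, classIdentifier_alt]
  have hnd := PySem.Dict.nodup_keys_ofList DictTokens
  refine (pv_items_foldl_insert_keys _ _ hnd).trans ?_
  refine Eq.trans ?_ (pv_items_foldl_insert_items _ _ ?_).symm
  · simp only [PySem.Dict.keys, List.map_map]
    apply List.map_congr_left
    intro p hp
    simp only [Function.comp]
    have hitems : (p.1, p.2) ∈ (PySem.Dict.ofList DictTokens).items := by simpa using hp
    rw [PySem.Dict.getD_of_mem_items _ hitems hnd []]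
    refine congrArg (Prod.mk p.1) ?_
    refine (pv_foldl_push _ (pvClassA (PySem.Dict.ofList a)) (pv_body (PySem.Dict.ofList a)) p.2 []).trans ?_
    simp only [List.nil_append]
    refine Eq.trans ?_ (pv_row_B (PySem.Dict.ofList a) p.2).symm
    exact List.map_congr_left (fun j _ => pv_token (PySem.Dict.ofList a) j)
  · simpa [PySem.Dict.keys] using hnd
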